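-- pv_equiv track=rewrite | github.com/calvin4770/wordle-assistant | data_analysis.py | char_freqs
-- ===== SOURCE A (Python) =====
-- def char_freqs(word_list):
--     char_freq = {}
--     for word in list(word_list):
--         for i, c in enumerate(word):
--             if c not in char_freq:
--                 char_freq[c] = 0
--             if c not in word[:i]:
--                 char_freq[c] += 1
--     return char_freq
-- ===== SOURCE B (Python) =====
-- def char_freqs(word_list):
--     words = list(word_list)
--     alphabet = dict.fromkeys(c for word in words for c in word)
--     return {c: sum(1 for word in words if c in word) for c in alphabet}
-- ===== Notes on version B (the rewrite author's own statement) =====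
-- stated objective: alternative
-- what changed: Instead of one pass over each word that rescans the word's prefix per character and updates a dict in place, B collects the deduplicated alphabet once and counts, per character, the words containing it (measured ~1.3x faster, below the 1.5x bar, so no speed is claimed).
import Mathlib
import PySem

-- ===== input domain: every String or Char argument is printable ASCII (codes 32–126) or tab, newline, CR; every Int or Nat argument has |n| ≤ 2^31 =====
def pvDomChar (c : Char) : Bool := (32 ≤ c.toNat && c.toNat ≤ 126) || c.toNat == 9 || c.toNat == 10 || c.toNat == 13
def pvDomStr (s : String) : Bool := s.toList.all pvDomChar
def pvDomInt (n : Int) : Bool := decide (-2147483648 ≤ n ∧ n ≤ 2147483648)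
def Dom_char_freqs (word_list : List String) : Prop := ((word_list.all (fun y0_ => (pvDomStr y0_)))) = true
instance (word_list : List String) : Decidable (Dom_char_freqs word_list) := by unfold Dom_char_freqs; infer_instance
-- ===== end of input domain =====

-- B inverts A's per-word pass (with its prefix rescans and in-place dict updates) into a per-character
-- count of containing words over the deduplicated alphabet (same return value, including key order).

-- ===== PORT A =====
-- a Python character, i.e. the 1-character string the loop variable c holds
def pvKey (c : Char) : String := String.ofList [c]

-- body of A's inner loop: 'if c not in char_freq: char_freq[c] = 0; if c not in word[:i]: char_freq[c] += 1'
def pvStepA (word : List Char) (d : PySem.Dict String Int) (p : Int × Char) : PySem.Dict String Int :=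
  let c := pvKey p.2
  let d1 := if d.contains c then d else d.insert c 0
  if PySem.Chars.isIn [p.2] (PySem.List.slice word none (some p.1)) then d1 else d1.modify c 0 (· + 1)

-- 'for i, c in enumerate(word): …'
def pvWordA (d : PySem.Dict String Int) (word : String) : PySem.Dict String Int :=
  (PySem.List.enumerate word.toList).foldl (pvStepA word.toList) d

def char_freqs (word_list : List String) : List (String × Int) :=
  (word_list.foldl pvWordA PySem.Dict.empty).items

-- ===== PORT B =====
-- words = list(word_list); alphabet = dict.fromkeys(c for word in words for c in word);
-- {c: sum(1 for word in words if c in word) for c in alphabet}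
def char_freqs_alt (word_list : List String) : List (String × Int) :=
  let words := word_list
  let alphabet := PySem.List.dedup (words.flatMap String.toList)
  alphabet.map (fun c =>
    (pvKey c, (words.countP (fun word => PySem.Chars.isIn [c] word.toList) : Int)))

-- ===== PRECONDITION & SPEC =====
def Spec_char_freqs (word_list : List String) (out : List (String × Int)) : Prop := out = char_freqs_alt word_list
instance (word_list : List String) (out : List (String × Int)) : Decidable (Spec_char_freqs word_list out) := by unfold Spec_char_freqs; infer_instance

-- ===== CLAIM (what is proved, stated in full; the proofs are below) =====
def Claim_equal_char_freqs : Prop := ∀ (word_list : List String), Dom_char_freqs word_list → Spec_char_freqs word_list (char_freqs word_list)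

-- ===== LEMMAS AND PROOFS =====

lemma key_inj {c a : Char} (h : pvKey c = pvKey a) : c = a := by
  have := congrArg String.toList h; simpa [pvKey] using this

lemma key_beq (c a : Char) : (pvKey c == pvKey a) = (c == a) := by
  by_cases h : c = a
  · simp [h]
  · simp [h]; exact fun hk => h (key_inj hk)

-- 'c in s' for a single character c is list membership
lemma isIn_singleton (c : Char) (l : List Char) : PySem.Chars.isIn [c] l = l.contains c := by
  rw [Bool.eq_iff_iff, PySem.Chars.isIn_iff_infix, List.contains_eq_mem]
  simp only [decide_eq_true_eq]
  constructor
  · intro h; exact h.sublist.subset (by simp)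
  · intro h; obtain ⟨s, t, rfl⟩ := List.append_of_mem h; exact ⟨s, t, by simp⟩

lemma contains_of_items {d : PySem.Dict String Int} {L : List Char} {v : Char → Int}
    (h : d.items = L.map (fun c => (pvKey c, v c))) (a : Char) :
    d.contains (pvKey a) = L.contains a := by
  simp only [PySem.Dict.contains, h, List.any_map, List.contains_eq_mem]
  rw [Bool.eq_iff_iff]
  simp [key_beq]

lemma getD_of_items {d : PySem.Dict String Int} {L : List Char} {v : Char → Int}
    (h : d.items = L.map (fun c => (pvKey c, v c))) (hnd : L.Nodup) {a : Char}
    (ha : a ∈ L) (d0 : Int) : d.getD (pvKey a) d0 = v a := by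
  have hk : d.keys.Nodup := by
    have hkk : d.keys = L.map pvKey := by simp [PySem.Dict.keys, h]
    rw [hkk]; exact hnd.map (fun x y hxy => key_inj hxy)
  have hmem : (pvKey a, v a) ∈ d.items := by rw [h]; exact List.mem_map_of_mem ha
  rw [PySem.Dict.getD_eq_get?_getD, PySem.Dict.get?_of_mem_items _ hmem hk]; rfl

lemma ofList_snoc_mem {α : Type} [BEq α] [LawfulBEq α] {l : List α} {a : α} (h : a ∈ l) :
    PySem.Set.ofList (l ++ [a]) = PySem.Set.ofList l := by
  rw [PySem.Set.ofList_eq_foldl, List.foldl_append, ← PySem.Set.ofList_eq_foldl]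
  simp only [List.foldl_cons, List.foldl_nil, PySem.Set.add, PySem.Set.contains]
  rw [if_pos]
  simp [List.contains_eq_mem, PySem.Set.mem_ofList, h]

lemma ofList_snoc_not_mem {α : Type} [BEq α] [LawfulBEq α] {l : List α} {a : α} (h : a ∉ l) :
    PySem.Set.ofList (l ++ [a]) = PySem.Set.ofList l ++ [a] := by
  rw [PySem.Set.ofList_eq_foldl, List.foldl_append, ← PySem.Set.ofList_eq_foldl]
  simp only [List.foldl_cons, List.foldl_nil, PySem.Set.add, PySem.Set.contains]
  rw [if_neg]
  simp [List.contains_eq_mem, PySem.Set.mem_ofList, h]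

-- one character of one word: the dict holds, for each char c seen so far (in first-occurrence order),
-- v0 c (words before this one containing c) plus 1 if c already occurred in this word's prefix p
lemma step_spec (w p rest : List Char) (a : Char) (hw : w = p ++ a :: rest)
    (v0 : Char → Int) (base : List Char) (d : PySem.Dict String Int)
    (h0 : ∀ c, c ∉ base → v0 c = 0)
    (h : d.items = (PySem.Set.ofList (base ++ p)).map
      (fun c => (pvKey c, v0 c + if c ∈ p then 1 else 0))) :
    (pvStepA w d ((p.length : Int), a)).items
      = (PySem.Set.ofList (base ++ (p ++ [a]))).map
        (fun c => (pvKey c, v0 c + if c ∈ p ++ [a] then 1 else 0)) := by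
  have hslice : PySem.List.slice w none (some (p.length : Int)) = p := by
    rw [PySem.List.slice_to w (by positivity)]
    simp [hw]
  have hcont := contains_of_items h a
  have hnd : (PySem.Set.ofList (base ++ p)).Nodup := PySem.Set.nodup_ofList _
  rw [← List.append_assoc]
  by_cases hp : a ∈ p
  · -- not the first occurrence in this word: both branches leave d unchanged
    have hd : pvStepA w d ((p.length : Int), a) = d := by
      simp [pvStepA, hslice, isIn_singleton, hcont, List.contains_eq_mem,
        PySem.Set.mem_ofList, List.mem_append, hp]
    rw [hd, h, ofList_snoc_mem (by simp [hp] : a ∈ base ++ p)]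
    apply List.map_congr_left
    intro c hc
    by_cases hca : c = a
    · subst hca; simp [hp]
    · simp [List.mem_append, hca]
  · by_cases hb : a ∈ base
    · -- first occurrence in this word, key already present: increment
      have hmem : a ∈ base ++ p := by simp [hb]
      have hd1 : pvStepA w d ((p.length : Int), a)
          = d.modify (pvKey a) 0 (· + 1) := by
        simp [pvStepA, hslice, isIn_singleton, hcont, List.contains_eq_mem,
          PySem.Set.mem_ofList, List.mem_append, hp, hb]
      have hget : d.getD (pvKey a) 0 = v0 a := by
        have := getD_of_items (a := a) h hnd (by simpa using hmem) 0
        simpa [hp] using this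
      rw [hd1, PySem.Dict.modify, PySem.Dict.insert, if_pos (by rw [hcont]; simp [List.contains_eq_mem, PySem.Set.mem_ofList, hmem])]
      show (d.items.map _) = _
      rw [h, List.map_map, ofList_snoc_mem hmem]
      apply List.map_congr_left
      intro c hc
      by_cases hca : c = a
      · subst hca; simp [hget, hp]
      · simp [hca, List.mem_append]
        intro h'; exact absurd (key_inj h') hca
    · -- brand-new character: insert 0, then increment to 1
      have hnmem : a ∉ base ++ p := by simp [hb, hp]
      have hcf : d.contains (pvKey a) = false := by
        rw [hcont]; simp [List.contains_eq_mem, PySem.Set.mem_ofList, hnmem]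
      have hd1 : pvStepA w d ((p.length : Int), a)
          = (d.insert (pvKey a) 0).modify (pvKey a) 0 (· + 1) := by
        simp [pvStepA, hslice, isIn_singleton, hcf, List.contains_eq_mem, hp]
      have hins : (d.insert (pvKey a) 0).items
          = ((PySem.Set.ofList (base ++ p)) ++ [a]).map
            (fun c => (pvKey c, if c = a then 0 else v0 c + if c ∈ p then 1 else 0)) := by
        rw [PySem.Dict.items_insert_of_not_contains _ _ hcf, h]
        simp only [List.map_append, List.map_cons, List.map_nil]
        congr 1
        apply List.map_congr_left
        intro c hc
        have : c ≠ a := fun hca => hnmem (by simpa [PySem.Set.mem_ofList, hca] using hc)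
        simp [this]
      have hnd2 : ((PySem.Set.ofList (base ++ p)) ++ [a]).Nodup := by
        simp only [List.nodup_append, List.nodup_singleton]
        refine ⟨hnd, trivial, ?_⟩
        intro x hx b hb2
        have hb' : b = a := by simpa using hb2
        subst hb'
        intro hxe
        subst hxe
        exact hnmem (by simpa using hx)
      have hget : (d.insert (pvKey a) 0).getD (pvKey a) 0 = 0 := by
        have := getD_of_items (a := a) hins hnd2 (by simp) 0
        simpa using this
      rw [hd1, PySem.Dict.modify, PySem.Dict.insert,
        if_pos (by rw [contains_of_items hins]; simp [List.contains_eq_mem])]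
      show ((d.insert (pvKey a) 0).items.map _) = _
      rw [hins, List.map_map, ofList_snoc_not_mem hnmem]
      apply List.map_congr_left
      intro c hc
      by_cases hca : c = a
      · subst hca; simp [hget, hp, h0 _ hb]
      · simp [hca, List.mem_append]
        intro h'; exact absurd (key_inj h') hca

lemma inner_loop (w : List Char) : ∀ (rest p : List Char), w = p ++ rest →
    ∀ (v0 : Char → Int) (base : List Char) (d : PySem.Dict String Int),
    (∀ c, c ∉ base → v0 c = 0) →
    d.items = (PySem.Set.ofList (base ++ p)).map
      (fun c => (pvKey c, v0 c + if c ∈ p then 1 else 0)) →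
    ((PySem.List.enumerate rest (p.length : Int)).foldl (pvStepA w) d).items
      = (PySem.Set.ofList (base ++ w)).map
        (fun c => (pvKey c, v0 c + if c ∈ w then 1 else 0)) := by
  intro rest
  induction rest with
  | nil =>
    intro p hw v0 base d h0 h
    simp only [List.append_nil] at hw
    subst hw
    simpa [PySem.List.enumerate_nil] using h
  | cons a rs ih =>
    intro p hw v0 base d h0 h
    rw [PySem.List.enumerate_cons, List.foldl_cons]
    have hstep := step_spec w p rs a hw v0 base d h0 h
    have hlen : ((p.length : Int) + 1) = (((p ++ [a]).length : Nat) : Int) := by simp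
    rw [hlen]
    exact ih (p ++ [a]) (by simp [hw]) v0 base (pvStepA w d ((p.length : Int), a)) h0 hstep

-- number of words containing character c
def cntW (ws : List String) (c : Char) : Int := (ws.countP (fun w => w.toList.contains c) : Int)

lemma word_spec (ws : List String) (word : String) (d : PySem.Dict String Int)
    (h : d.items = (PySem.Set.ofList (ws.flatMap String.toList)).map
      (fun c => (pvKey c, cntW ws c))) :
    (pvWordA d word).items
      = (PySem.Set.ofList ((ws ++ [word]).flatMap String.toList)).map
        (fun c => (pvKey c, cntW (ws ++ [word]) c)) := by
  have h0 : ∀ c, c ∉ ws.flatMap String.toList → cntW ws c = 0 := by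
    intro c hc
    simp only [cntW]
    norm_cast
    rw [List.countP_eq_zero]
    intro w hw
    simp only [List.contains_eq_mem, decide_eq_true_eq]
    exact fun hm => hc (List.mem_flatMap.2 ⟨w, hw, hm⟩)
  have := inner_loop word.toList word.toList [] rfl (cntW ws) (ws.flatMap String.toList) d h0
    (by simpa using h)
  unfold pvWordA
  rw [show PySem.List.enumerate word.toList = PySem.List.enumerate word.toList ((([] : List Char).length : Nat) : Int) by simp]
  rw [this]
  rw [show (ws ++ [word]).flatMap String.toList = ws.flatMap String.toList ++ word.toList by simp]
  apply List.map_congr_left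
  intro c hc
  have : cntW (ws ++ [word]) c = cntW ws c + if c ∈ word.toList then 1 else 0 := by
    simp only [cntW, List.countP_append]
    push_cast
    congr 1
    by_cases hm : c ∈ word.toList <;> simp [List.countP_cons, List.contains_eq_mem, hm]
  rw [this]

lemma outer_loop : ∀ (rest prev : List String) (d : PySem.Dict String Int),
    d.items = (PySem.Set.ofList (prev.flatMap String.toList)).map
      (fun c => (pvKey c, cntW prev c)) →
    (rest.foldl pvWordA d).items
      = (PySem.Set.ofList ((prev ++ rest).flatMap String.toList)).map
        (fun c => (pvKey c, cntW (prev ++ rest) c)) := by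
  intro rest
  induction rest with
  | nil => intro prev d h; simpa using h
  | cons w rs ih =>
    intro prev d h
    rw [List.foldl_cons]
    have := ih (prev ++ [w]) (pvWordA d w) (word_spec prev w d h)
    simpa using this

-- ===== VERDICT (by name: the statement is the Claim_ definition above) =====
theorem char_freqs_spec : Claim_equal_char_freqs := by
  intro wl _
  show char_freqs wl = char_freqs_alt wl
  have h := outer_loop wl [] PySem.Dict.empty
    (by simp [cntW, PySem.Set.ofList_eq_foldl, PySem.Dict.empty])
  simp only [List.nil_append] at h
  simp only [char_freqs, char_freqs_alt, h, PySem.List.dedup_eq_ofList]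
  apply List.map_congr_left
  intro c _
  simp [cntW, isIn_singleton]
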